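-- pv_equiv track=rewrite | github.com/theHdd4/TrinityFastAPIDjangoReact | TrinityBackendFastAPI/app/features/dataframe_operations/app/routes.py | _fn_bin
-- ===== SOURCE A (Python) =====
-- import math
-- from bisect import bisect_right
-- from typing import Dict, Any, List, Tuple, Optional
--
-- def _is_null(value: Any) -> bool:
--     if value is None:
--         return True
--     if isinstance(value, float):
--         return math.isnan(value)
--     return False
--
-- def _to_number(value: Any) -> float | None:
--     if _is_null(value):
--         return None
--     if isinstance(value, bool):
--         return float(value)
--     if isinstance(value, (int, float)):
--         return float(value)
--     try:
--         return float(str(value))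
--     except (TypeError, ValueError):
--         return None
--
-- def _fn_bin(value: Any, bins: Any) -> Any:
--     try:
--         edges = [float(b) for b in bins]
--     except TypeError:
--         return None
--     if len(edges) < 2:
--         return None
--     edges.sort()
--     num = _to_number(value)
--     if num is None:
--         return None
--     if num < edges[0]:
--         return f"<{edges[0]}"
--     idx = bisect_right(edges, num) - 1
--     if idx >= len(edges) - 1:
--         return f">={edges[-1]}"
--     lower = edges[idx]
--     upper = edges[idx + 1]
--     return f"[{lower}, {upper})"
-- ===== SOURCE B (Python) =====
-- def _fn_bin(value, bins):
--     edges = sorted(float(b) for b in bins)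
--     if len(edges) < 2:
--         return None
--     num = float(value)
--     if num < edges[0]:
--         return f"<{edges[0]}"
--     for lo, hi in zip(edges, edges[1:]):
--         if num < hi:
--             return f"[{lo}, {hi})"
--     return f">={edges[-1]}"
-- ===== Notes on version B (the rewrite author's own statement) =====
-- stated objective: simpler
-- what changed: The bisect_right index computation (idx = bisect_right(edges, num) - 1 plus the idx >= len-1 check and two indexed reads) is replaced by a single linear scan over consecutive edge pairs via zip that returns the first interval whose upper edge exceeds num, falling through to the >= case.
import Mathlib
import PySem

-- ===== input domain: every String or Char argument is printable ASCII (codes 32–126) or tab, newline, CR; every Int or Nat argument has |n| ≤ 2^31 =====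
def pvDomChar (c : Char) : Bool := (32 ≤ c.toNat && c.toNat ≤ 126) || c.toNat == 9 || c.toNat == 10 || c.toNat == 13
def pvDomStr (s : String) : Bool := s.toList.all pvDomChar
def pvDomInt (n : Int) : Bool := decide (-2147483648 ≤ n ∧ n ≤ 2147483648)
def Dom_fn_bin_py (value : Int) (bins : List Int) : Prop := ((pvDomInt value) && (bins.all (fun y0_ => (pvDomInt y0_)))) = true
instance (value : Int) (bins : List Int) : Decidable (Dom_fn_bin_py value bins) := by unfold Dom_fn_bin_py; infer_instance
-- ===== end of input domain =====

-- B replaces the bisect_right index arithmetic by a linear scan over consecutive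
-- edge pairs (simpler; same sort-dominated cost). On the Int domain float(b) is
-- exact, so f"{float(n)}" is rendered as str(n) ++ ".0" in both ports.

-- ===== PORT A =====
-- shared rendering of Python's f"{x}" for x = float(n), n : Int (exact on |n| ≤ 2^31): str(n) + ".0"
def pyFloat (n : Int) : String := PySem.Int.toStr n ++ ".0"

def fn_bin_py (value : Int) (bins : List Int) : Option String :=
  -- edges = sorted([float(b) for b in bins]) (sorting ints ≙ sorting their exact floats)
  let edges := PySem.List.sorted bins (fun x => x) false
  if edges.length < 2 then none
  else
    -- num = _to_number(value) = float(value): never None for an int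
    let num := value
    if num < edges.getD 0 0 then some ("<" ++ pyFloat (edges.getD 0 0))
    else
      let idx := PySem.List.bisectRight edges num - 1
      if edges.length - 1 ≤ idx then some (">=" ++ pyFloat (edges.getD (edges.length - 1) 0))
      else some ("[" ++ pyFloat (edges.getD idx 0) ++ ", " ++ pyFloat (edges.getD (idx + 1) 0) ++ ")")

-- ===== PORT B =====
-- the 'for lo, hi in zip(edges, edges[1:])' scan of Source B
def binScan (num : Int) : List Int → Option String
  | lo :: hi :: rest =>
      if num < hi then some ("[" ++ pyFloat lo ++ ", " ++ pyFloat hi ++ ")")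
      else binScan num (hi :: rest)
  | _ => none

def fn_bin_py_alt (value : Int) (bins : List Int) : Option String :=
  let edges := PySem.List.sorted bins (fun x => x) false
  if edges.length < 2 then none
  else
    if value < edges.getD 0 0 then some ("<" ++ pyFloat (edges.getD 0 0))
    else
      match binScan value edges with
      | some s => some s
      | none => some (">=" ++ pyFloat (edges.getD (edges.length - 1) 0))

-- ===== PRECONDITION & SPEC =====
def Spec_fn_bin_py (value : Int) (bins : List Int) (out : Option String) : Prop := out = fn_bin_py_alt value bins
instance (value : Int) (bins : List Int) (out : Option String) : Decidable (Spec_fn_bin_py value bins out) := by unfold Spec_fn_bin_py; infer_instance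

-- ===== CLAIM (what is proved, stated in full; the proofs are below) =====
def Claim_equal_fn_bin_py : Prop := ∀ (value : Int) (bins : List Int), Dom_fn_bin_py value bins → Spec_fn_bin_py value bins (fn_bin_py value bins)

-- ===== LEMMAS AND PROOFS =====

-- bisectRight is the unique index with the cut property (uniqueness from PySem.List.bisectRight_spec)
theorem bisectRight_eq_of (xs : List Int) (x : Int)
    (hs : xs.Pairwise (· ≤ ·)) (k : Nat) (hk : k ≤ xs.length)
    (h1 : ∀ j (hj : j < xs.length), j < k → xs[j] ≤ x)
    (h2 : ∀ j (hj : j < xs.length), k ≤ j → x < xs[j]) :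
    PySem.List.bisectRight xs x = k := by
  obtain ⟨hb, hb1, hb2⟩ := PySem.List.bisectRight_spec xs x hs
  set b := PySem.List.bisectRight xs x with hbdef
  rcases Nat.lt_trichotomy b k with h | h | h
  · have hbl : b < xs.length := lt_of_lt_of_le h hk
    have := h1 b hbl h
    have := hb2 b hbl (le_refl _)
    omega
  · exact h
  · have hkl : k < xs.length := lt_of_lt_of_le h hb
    have := hb1 k hkl h
    have := h2 k hkl (le_refl _)
    omega

theorem bisectRight_cons_of_le (lo x : Int) (rest : List Int)
    (hs : (lo :: rest).Pairwise (· ≤ ·)) (h : lo ≤ x) :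
    PySem.List.bisectRight (lo :: rest) x = PySem.List.bisectRight rest x + 1 := by
  have hs' : rest.Pairwise (· ≤ ·) := hs.tail
  obtain ⟨hb, hb1, hb2⟩ := PySem.List.bisectRight_spec rest x hs'
  apply bisectRight_eq_of (lo :: rest) x hs (PySem.List.bisectRight rest x + 1)
    (by simpa using Nat.succ_le_succ hb)
  · intro j hj hjk
    cases j with
    | zero => simpa using h
    | succ j' =>
        simp only [List.getElem_cons_succ]
        exact hb1 j' (by simpa using hj) (by omega)
  · intro j hj hjk
    cases j with
    | zero => omega
    | succ j' =>
        simp only [List.getElem_cons_succ]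
        exact hb2 j' (by simpa using hj) (by omega)

-- the core equivalence: on a sorted nonempty edge list whose head is ≤ v,
-- the bisect branch of A equals the pair scan of B (with the common >= fallback)
theorem scan_eq_bisect (v : Int) (lo : Int) (rest : List Int)
    (hs : (lo :: rest).Pairwise (· ≤ ·)) (hlo : lo ≤ v) :
    (if (lo :: rest).length - 1 ≤ PySem.List.bisectRight (lo :: rest) v - 1 then
       some (">=" ++ pyFloat ((lo :: rest).getD ((lo :: rest).length - 1) 0))
     else
       some ("[" ++ pyFloat ((lo :: rest).getD (PySem.List.bisectRight (lo :: rest) v - 1) 0) ++ ", " ++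
             pyFloat ((lo :: rest).getD (PySem.List.bisectRight (lo :: rest) v - 1 + 1) 0) ++ ")"))
  = (match binScan v (lo :: rest) with
     | some s => some s
     | none => some (">=" ++ pyFloat ((lo :: rest).getD ((lo :: rest).length - 1) 0))) := by
  induction rest generalizing lo with
  | nil =>
      have hb : PySem.List.bisectRight [lo] v = 1 := by
        apply bisectRight_eq_of [lo] v hs 1 (by simp)
        · intro j hj hjk
          interval_cases j; simpa using hlo
        · intro j hj hjk
          simp at hj; omega
      simp [binScan, hb]
  | cons hi rest' ih =>
      have hlohi : lo ≤ hi := by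
        have := List.pairwise_cons.mp hs
        exact this.1 hi (by simp)
      by_cases hv : v < hi
      · -- bisectRight = 1: first interval wins
        have hb : PySem.List.bisectRight (lo :: hi :: rest') v = 1 := by
          apply bisectRight_eq_of _ v hs 1 (by simp)
          · intro j hj hjk
            interval_cases j
            simpa using hlo
          · intro j hj hjk
            cases j with
            | zero => omega
            | succ j' =>
                have hj' : j' < (hi :: rest').length := by simpa using hj
                -- every element of hi :: rest' is ≥ hi > v
                have hgoal : v < (hi :: rest')[j']'hj' := by
                  have hmem : (hi :: rest')[j']'hj' ∈ hi :: rest' := List.getElem_mem hj'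
                  rcases List.mem_cons.mp hmem with he | he
                  · rw [he]; exact hv
                  · have := (List.pairwise_cons.mp hs.tail).1 _ he
                    omega
                simpa using hgoal
        have hlen : ¬ ((lo :: hi :: rest').length - 1 ≤ PySem.List.bisectRight (lo :: hi :: rest') v - 1) := by
          simp [hb]
        simp [binScan, hv, hb]
      · -- hi ≤ v: drop lo, recurse
        rw [not_lt] at hv
        have hs' : (hi :: rest').Pairwise (· ≤ ·) := hs.tail
        have hb : PySem.List.bisectRight (lo :: hi :: rest') v
            = PySem.List.bisectRight (hi :: rest') v + 1 :=
          bisectRight_cons_of_le lo v (hi :: rest') hs hlo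
        have hb' : PySem.List.bisectRight (hi :: rest') v
            = PySem.List.bisectRight rest' v + 1 :=
          bisectRight_cons_of_le hi v rest' hs' hv
        have hIH := ih hi hs' hv
        have hscan : binScan v (lo :: hi :: rest') = binScan v (hi :: rest') := by
          simp [binScan, not_lt.mpr hv]
        have hlast : (lo :: hi :: rest').getD ((lo :: hi :: rest').length - 1) 0
            = (hi :: rest').getD ((hi :: rest').length - 1) 0 := by
          simp only [List.length_cons, Nat.add_sub_cancel, List.getD_cons_succ]
        rw [hscan, hlast, ← hIH]
        -- both sides now: compare index arithmetic on the cons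
        set b' := PySem.List.bisectRight (hi :: rest') v with hb'def
        have hb'pos : 1 ≤ b' := by omega
        have hcond : ((lo :: hi :: rest').length - 1 ≤ PySem.List.bisectRight (lo :: hi :: rest') v - 1)
            ↔ ((hi :: rest').length - 1 ≤ b' - 1) := by
          rw [hb]; simp; omega
        by_cases hc : (hi :: rest').length - 1 ≤ b' - 1
        · rw [if_pos (hcond.mpr hc), if_pos hc]
        · rw [if_neg (fun h => hc (hcond.mp h)), if_neg hc]
          have h1 : (lo :: hi :: rest').getD (PySem.List.bisectRight (lo :: hi :: rest') v - 1) 0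
              = (hi :: rest').getD (b' - 1) 0 := by
            rw [hb]
            have : b' + 1 - 1 = (b' - 1) + 1 := by omega
            rw [this, List.getD_cons_succ]
          have h2 : (lo :: hi :: rest').getD (PySem.List.bisectRight (lo :: hi :: rest') v - 1 + 1) 0
              = (hi :: rest').getD (b' - 1 + 1) 0 := by
            rw [hb]
            have : b' + 1 - 1 + 1 = (b' - 1 + 1) + 1 := by omega
            rw [this, List.getD_cons_succ]
          rw [h1, h2]

-- ===== VERDICT (by name: the statement is the Claim_ definition above) =====
theorem fn_bin_py_spec : Claim_equal_fn_bin_py := by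
  intro value bins _
  unfold Spec_fn_bin_py fn_bin_py fn_bin_py_alt
  dsimp only
  set edges := PySem.List.sorted bins (fun x => x) false with hedges
  have hs : edges.Pairwise (· ≤ ·) := by
    rw [hedges]; simpa using PySem.List.sorted_pairwise bins (fun x => x)
  clear_value edges
  by_cases hlen : edges.length < 2
  · rw [if_pos hlen, if_pos hlen]
  · rw [if_neg hlen, if_neg hlen]
    by_cases hv : value < edges.getD 0 0
    · rw [if_pos hv, if_pos hv]
    · rw [if_neg hv, if_neg hv]
      cases edges with
      | nil => simp at hlen
      | cons lo rest =>
          have hlo : lo ≤ value := by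
            simpa using not_lt.mp hv
          exact scan_eq_bisect value lo rest hs hlo
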